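-- pv_equiv track=rewrite | github.com/jamescamb/project-euler | problem_026.py | calc_longest_recur_cycle
-- ===== SOURCE A (Python) =====
-- def calc_longest_recur_cycle(limit):
--
--     max_len = 0
--     max_d = 1
--
--     for d in range(1, limit):
--         quotient = {0: 0}
--         cur_value = 1
--         len_recur = 0
--
--         while cur_value not in quotient:
--             len_recur += 1
--             quotient[cur_value] = len_recur
--             cur_value = (cur_value % d) * 10
--
--         if not cur_value:
--             continue
--
--         len_recur -= quotient[cur_value]
--
--         if len_recur > max_len:
--             max_len = len_recur
--             max_d = d
--
--     return max_d
-- ===== SOURCE B (Python) =====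
-- def calc_longest_recur_cycle(limit):
--     max_len = 0
--     max_d = 1
--     for d in range(1, limit):
--         # the recurring-cycle length of 1/d is the multiplicative order of 10
--         # modulo d with all factors 2 and 5 removed
--         m = d
--         while m % 2 == 0:
--             m //= 2
--         while m % 5 == 0:
--             m //= 5
--         if m == 1:
--             continue
--         r = 10 % m
--         cycle = 1
--         while r != 1:
--             r = r * 10 % m
--             cycle += 1
--         if cycle > max_len:
--             max_len = cycle
--             max_d = d
--     return max_d
-- ===== Notes on version B (the rewrite author's own statement) =====
-- stated objective: alternative
-- what changed: B replaces A's per-denominator dict-based repetition search over the values 10*(r%d) by number theory: strip the factors 2 and 5 from d and compute the cycle length as the multiplicative order of 10 modulo the stripped d with a plain multiply-mod loop (no dict, no pre-period walk); measured ~2x faster at mid sizes but not confirmed at the largest timing size, so no speed claim is made.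
-- intended difference: For limit in {4,5,6,7} A returns 1 because its inner loop computes cycle length minus one (it stores the repeated value with an index one past its first occurrence) and so never detects the length-1 cycle of 1/3; B returns 3, the intended denominator with the longest recurring cycle below those limits; for limit >= 8 the uniform -1 shift never changes the argmax. — e.g. on calc_longest_recur_cycle(4): A returns 1, B returns 3
import Mathlib
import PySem

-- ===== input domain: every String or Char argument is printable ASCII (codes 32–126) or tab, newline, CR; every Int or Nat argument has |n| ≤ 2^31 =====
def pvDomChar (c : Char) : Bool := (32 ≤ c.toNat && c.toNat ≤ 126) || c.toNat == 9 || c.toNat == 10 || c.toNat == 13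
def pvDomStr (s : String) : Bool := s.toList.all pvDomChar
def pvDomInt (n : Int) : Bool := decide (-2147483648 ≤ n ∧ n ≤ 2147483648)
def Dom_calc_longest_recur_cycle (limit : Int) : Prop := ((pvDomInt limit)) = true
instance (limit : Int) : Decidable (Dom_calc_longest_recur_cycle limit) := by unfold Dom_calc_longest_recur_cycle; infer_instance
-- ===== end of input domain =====

-- B computes each cycle length as the multiplicative order of 10 modulo d stripped of its
-- factors 2 and 5 (no dict, no pre-period walk): a different, number-theoretic algorithm.


-- ===== PORT A =====
-- the inner 'while cur_value not in quotient' loop; fuel only makes it total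
-- (we prove it always exits with fuel 2*d+4 to spare).  Python's dict 'quotient' is used
-- only for int-key membership / lookup / insert (its order is never observed), for which
-- Std.TreeMap Int Int is exact (and evaluable in reasonable time, unlike an assoc list).
def aWhile (d : Int) : Nat → Std.TreeMap Int Int → Int → Int → (Std.TreeMap Int Int × Int × Int)
  | 0, q, cur, len => (q, cur, len)
  | fuel+1, q, cur, len =>
    if q.contains cur then (q, cur, len)
    else aWhile d fuel (q.insert cur (len+1)) (PySem.Int.mod cur d * 10) (len + 1)

-- one iteration of the 'for d in range(1, limit)' body; st = (max_len, max_d)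
def aBody (st : Int × Int) (d : Int) : Int × Int :=
  let r := aWhile d (2 * d + 4).toNat ((∅ : Std.TreeMap Int Int).insert 0 0) 1 0
  if r.2.1 = 0 then st
  else
    let len := r.2.2 - (r.1.getD r.2.1 0)   -- len_recur -= quotient[cur_value] (key is present)
    if len > st.1 then (len, d) else st

def calc_longest_recur_cycle (limit : Int) : Int :=
  ((PySem.List.pyRange 1 limit 1).foldl aBody (0, 1)).2

-- ===== PORT B =====
-- while m % p == 0: m //= p   (p is literally 2 resp. 5; fuel m only makes the loop total:
-- when fuel runs out the loop returns the current m, exactly what the exit branch returns)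
def bStripF (p : Int) : Nat → Int → Int
  | 0, m => m
  | fuel+1, m => if PySem.Int.mod m p = 0 then bStripF p fuel (PySem.Int.floordiv m p) else m

def bStrip (p : Int) (m : Int) : Int := bStripF p m.toNat m

-- r = 10 % m; cycle = 1; while r != 1: r = r * 10 % m; cycle += 1   (fuel m only makes it total)
def bOrder (m : Int) : Nat → Int → Int → Int
  | 0, _, c => c
  | fuel+1, r, c => if r = 1 then c else bOrder m fuel (PySem.Int.mod (r * 10) m) (c + 1)

def bBody (st : Int × Int) (d : Int) : Int × Int :=
  let m := bStrip 5 (bStrip 2 d)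
  if m = 1 then st
  else
    let cycle := bOrder m m.toNat (PySem.Int.mod 10 m) 1
    if cycle > st.1 then (cycle, d) else st

def calc_longest_recur_cycle_alt (limit : Int) : Int :=
  ((PySem.List.pyRange 1 limit 1).foldl bBody (0, 1)).2

-- ===== PRECONDITION & SPEC =====
-- For limit in {4,5,6,7} A returns 1: its inner loop computes cycle length MINUS ONE (the
-- repeated value is stored with index one past its first occurrence), so length-1 cycles
-- (1/3 = 0.(3)) are invisible to it; B returns 3, the intended answer. For limit ≥ 8 the
-- uniform -1 shift never changes the strict argmax.
def D_calc_longest_recur_cycle (limit : Int) : Prop := 4 ≤ limit ∧ limit ≤ 7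
instance (limit : Int) : Decidable (D_calc_longest_recur_cycle limit) := by
  unfold D_calc_longest_recur_cycle; infer_instance

def Spec_calc_longest_recur_cycle (limit : Int) (out : Int) : Prop :=
  ¬ D_calc_longest_recur_cycle limit → out = calc_longest_recur_cycle_alt limit
instance (limit : Int) (out : Int) : Decidable (Spec_calc_longest_recur_cycle limit out) := by
  unfold Spec_calc_longest_recur_cycle; infer_instance

def pvDiffWitness_calc_longest_recur_cycle : Int := 4
def pvDiffWitnessOut_calc_longest_recur_cycle : Int × Int := (1, 3)

-- ===== CLAIM (what is proved, stated in full; the proofs are below) =====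
def Claim_unchanged_calc_longest_recur_cycle : Prop :=
  ∀ (limit : Int), Dom_calc_longest_recur_cycle limit →
    Spec_calc_longest_recur_cycle limit (calc_longest_recur_cycle limit)

def Claim_changed_calc_longest_recur_cycle : Prop :=
  Dom_calc_longest_recur_cycle (pvDiffWitness_calc_longest_recur_cycle) ∧
  D_calc_longest_recur_cycle (pvDiffWitness_calc_longest_recur_cycle) ∧
  calc_longest_recur_cycle (pvDiffWitness_calc_longest_recur_cycle) = pvDiffWitnessOut_calc_longest_recur_cycle.1 ∧
  calc_longest_recur_cycle_alt (pvDiffWitness_calc_longest_recur_cycle) = pvDiffWitnessOut_calc_longest_recur_cycle.2 ∧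
  pvDiffWitnessOut_calc_longest_recur_cycle.1 ≠ pvDiffWitnessOut_calc_longest_recur_cycle.2

def Claim_exact_calc_longest_recur_cycle : Prop :=
  ∀ (limit : Int), Dom_calc_longest_recur_cycle limit →
    D_calc_longest_recur_cycle limit →
    calc_longest_recur_cycle limit ≠ calc_longest_recur_cycle_alt limit

-- ===== LEMMAS AND PROOFS =====

-- ---------- multiplicative order of 10 (ℕ, via Nat.find) ----------
theorem pvOrd_ex (M : ℕ) (hM : 0 < M) (hc : Nat.Coprime 10 M) :
    ∃ k, 10 ^ (k+1) % M = 1 % M := by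
  refine ⟨M.totient - 1, ?_⟩
  have ht : 0 < M.totient := Nat.totient_pos.mpr hM
  have e : M.totient - 1 + 1 = M.totient := by omega
  rw [e]
  exact Nat.ModEq.pow_totient hc

def pvOrd (M : ℕ) : ℕ :=
  if h : 0 < M ∧ Nat.Coprime 10 M then Nat.find (pvOrd_ex M h.1 h.2) + 1 else 0

theorem pvOrd_pos (M : ℕ) (hM : 0 < M) (hc : Nat.Coprime 10 M) : 0 < pvOrd M := by
  unfold pvOrd; rw [dif_pos ⟨hM, hc⟩]; omega

theorem pvOrd_pow (M : ℕ) (hM : 0 < M) (hc : Nat.Coprime 10 M) :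
    10 ^ pvOrd M ≡ 1 [MOD M] := by
  unfold pvOrd; rw [dif_pos ⟨hM, hc⟩]
  exact Nat.find_spec (pvOrd_ex M hM hc)

theorem pvOrd_min (M : ℕ) (hM : 0 < M) (hc : Nat.Coprime 10 M) (s : ℕ)
    (hs : 0 < s) (hlt : s < pvOrd M) : ¬ (10 ^ s ≡ 1 [MOD M]) := by
  unfold pvOrd at hlt; rw [dif_pos ⟨hM, hc⟩] at hlt
  intro hmod
  refine Nat.find_min (pvOrd_ex M hM hc) (m := s - 1) (by omega) ?_
  have e : s - 1 + 1 = s := by omega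
  rw [e]; exact hmod

theorem pvOrd_dvd (M : ℕ) (hM : 0 < M) (hc : Nat.Coprime 10 M) (s : ℕ) :
    (10 ^ s ≡ 1 [MOD M]) ↔ pvOrd M ∣ s := by
  constructor
  · intro hmod
    have ht : 0 < pvOrd M := pvOrd_pos M hM hc
    have hsplit : (10:ℕ) ^ s = ((10 ^ pvOrd M) ^ (s / pvOrd M)) * 10 ^ (s % pvOrd M) := by
      rw [← pow_mul, ← pow_add, Nat.div_add_mod]
    have h1 : ((10:ℕ) ^ pvOrd M) ^ (s / pvOrd M) * 10 ^ (s % pvOrd M)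
        ≡ 1 ^ (s / pvOrd M) * 10 ^ (s % pvOrd M) [MOD M] :=
      Nat.ModEq.mul ((pvOrd_pow M hM hc).pow _) Nat.ModEq.rfl
    have hr : (10:ℕ) ^ (s % pvOrd M) ≡ 1 [MOD M] := by
      have h0 : ((10:ℕ) ^ pvOrd M) ^ (s / pvOrd M) * 10 ^ (s % pvOrd M) ≡ 1 [MOD M] := by
        rw [← hsplit]; exact hmod
      have h2 := (Nat.ModEq.symm h1).trans h0
      simpa using h2
    by_cases h0 : s % pvOrd M = 0
    · exact Nat.dvd_of_mod_eq_zero h0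
    · exact absurd hr (pvOrd_min M hM hc _ (Nat.pos_of_ne_zero h0) (Nat.mod_lt _ ht))
  · rintro ⟨q, rfl⟩
    calc (10:ℕ) ^ (pvOrd M * q) = (10 ^ pvOrd M) ^ q := by rw [pow_mul]
    _ ≡ 1 ^ q [MOD M] := (pvOrd_pow M hM hc).pow q
    _ = 1 := one_pow q

theorem pvOrd_one : pvOrd 1 = 1 := by
  unfold pvOrd
  rw [dif_pos ⟨by norm_num, by decide⟩]
  have : Nat.find (pvOrd_ex 1 (by norm_num) (by decide)) = 0 :=
    (Nat.find_eq_zero _).mpr (by norm_num)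
  omega

theorem pvOrd_lt (M : ℕ) (hM : 2 ≤ M) (hc : Nat.Coprime 10 M) : pvOrd M < M := by
  have ht : 0 < M.totient := Nat.totient_pos.mpr (by omega)
  have hfind : Nat.find (pvOrd_ex M (by omega) hc) ≤ M.totient - 1 := by
    apply Nat.find_le
    have e : M.totient - 1 + 1 = M.totient := by omega
    rw [e]; exact Nat.ModEq.pow_totient hc
  have hle : pvOrd M ≤ M.totient := by
    unfold pvOrd; rw [dif_pos ⟨by omega, hc⟩]; omega
  exact lt_of_le_of_lt hle (Nat.totient_lt M (by omega))

theorem cop10 (M : ℕ) (h2 : ¬ 2 ∣ M) (h5 : ¬ 5 ∣ M) : Nat.Coprime 10 M := by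
  have e : (10:ℕ) = 2 * 5 := by norm_num
  rw [e, Nat.coprime_mul_iff_left]
  exact ⟨(Nat.Prime.coprime_iff_not_dvd Nat.prime_two).mpr h2,
         (Nat.Prime.coprime_iff_not_dvd (by norm_num)).mpr h5⟩

-- ---------- the key congruence characterisation ----------
theorem sub_one_odd (e : ℕ) (he : 1 ≤ e) (p : ℕ) (hp : p ∣ 10) (hp1 : 1 < p) :
    ¬ p ∣ (10 ^ e - 1) := by
  intro hdv
  have h10 : p ∣ 10 ^ e := dvd_pow hp (by omega)
  have hle : 1 ≤ (10:ℕ) ^ e := Nat.one_le_pow _ _ (by norm_num)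
  have hd1 : p ∣ 10 ^ e - (10 ^ e - 1) := Nat.dvd_sub h10 hdv
  have e1 : (10:ℕ) ^ e - (10 ^ e - 1) = 1 := by omega
  rw [e1] at hd1
  exact absurd (Nat.le_of_dvd (by norm_num) hd1) (by omega)

theorem ten_pow_eq (k : ℕ) : (10:ℕ) ^ k = 2 ^ k * 5 ^ k := by
  rw [show (10:ℕ) = 2 * 5 by norm_num, mul_pow]

theorem two_pow_dvd (a i : ℕ) (h : (2:ℕ) ^ a ∣ 10 ^ i) : a ≤ i := by
  rw [ten_pow_eq] at h
  have hcp : Nat.Coprime 2 (5 ^ i) := Nat.Coprime.pow_right i (by decide)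
  have h2 : (2:ℕ) ^ a ∣ 2 ^ i := Nat.Coprime.dvd_of_dvd_mul_right (Nat.Coprime.pow_left a hcp) h
  exact (Nat.pow_dvd_pow_iff_le_right (by norm_num)).mp h2

theorem five_pow_dvd (b i : ℕ) (h : (5:ℕ) ^ b ∣ 10 ^ i) : b ≤ i := by
  rw [ten_pow_eq, mul_comm] at h
  have hcp : Nat.Coprime 5 (2 ^ i) := Nat.Coprime.pow_right i (by decide)
  have h2 : (5:ℕ) ^ b ∣ 5 ^ i := Nat.Coprime.dvd_of_dvd_mul_right (Nat.Coprime.pow_left b hcp) h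
  exact (Nat.pow_dvd_pow_iff_le_right (by norm_num)).mp h2

theorem cong_lt (a b M n : ℕ) (hn : n = 2 ^ a * 5 ^ b * M)
    (h2 : ¬ 2 ∣ M) (h5 : ¬ 5 ∣ M) (hM : 0 < M) (i j : ℕ) (hij : i < j) :
    (10 ^ i ≡ 10 ^ j [MOD n]) ↔ (max a b ≤ i ∧ pvOrd M ∣ (j - i)) := by
  have hc := cop10 M h2 h5
  have hpow : (10:ℕ) ^ i ≤ 10 ^ j := Nat.pow_le_pow_right (by norm_num) (le_of_lt hij)
  rw [Nat.modEq_iff_dvd' hpow]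
  have hfact : (10:ℕ) ^ j - 10 ^ i = 10 ^ i * (10 ^ (j - i) - 1) := by
    rw [Nat.mul_sub, mul_one, ← pow_add]
    congr 2
    omega
  rw [hfact]
  have he1 : 1 ≤ j - i := by omega
  have hodd2 : ¬ 2 ∣ (10 ^ (j - i) - 1) := sub_one_odd _ he1 2 (by norm_num) (by norm_num)
  have hodd5 : ¬ 5 ∣ (10 ^ (j - i) - 1) := sub_one_odd _ he1 5 (by norm_num) (by norm_num)
  have honele : 1 ≤ (10:ℕ) ^ (j - i) := Nat.one_le_pow _ _ (by norm_num)
  constructor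
  · intro hdvd
    have hMn : M ∣ n := ⟨2 ^ a * 5 ^ b, by rw [hn]; ring⟩
    have hMd : M ∣ 10 ^ i * (10 ^ (j - i) - 1) := hMn.trans hdvd
    have hM1 : M ∣ 10 ^ (j - i) - 1 :=
      Nat.Coprime.dvd_of_dvd_mul_left (Nat.Coprime.pow_right i hc.symm) hMd
    have hordd : pvOrd M ∣ (j - i) := by
      rw [← pvOrd_dvd M hM hc]
      exact ((Nat.modEq_iff_dvd' honele).mpr hM1).symm
    have h2a : a ≤ i := by
      have h2n : (2:ℕ) ^ a ∣ n := ⟨5 ^ b * M, by rw [hn]; ring⟩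
      have hd : (2:ℕ) ^ a ∣ 10 ^ i * (10 ^ (j - i) - 1) := h2n.trans hdvd
      have hcp : Nat.Coprime (2 ^ a) (10 ^ (j - i) - 1) :=
        Nat.Coprime.pow_left a ((Nat.Prime.coprime_iff_not_dvd Nat.prime_two).mpr hodd2)
      exact two_pow_dvd a i (Nat.Coprime.dvd_of_dvd_mul_right hcp hd)
    have h5b : b ≤ i := by
      have h5n : (5:ℕ) ^ b ∣ n := ⟨2 ^ a * M, by rw [hn]; ring⟩
      have hd : (5:ℕ) ^ b ∣ 10 ^ i * (10 ^ (j - i) - 1) := h5n.trans hdvd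
      have hcp : Nat.Coprime (5 ^ b) (10 ^ (j - i) - 1) :=
        Nat.Coprime.pow_left b ((Nat.Prime.coprime_iff_not_dvd (by norm_num)).mpr hodd5)
      exact five_pow_dvd b i (Nat.Coprime.dvd_of_dvd_mul_right hcp hd)
    exact ⟨max_le h2a h5b, hordd⟩
  · rintro ⟨hmax, hdvd⟩
    have h25 : 2 ^ a * 5 ^ b ∣ 10 ^ i := by
      rw [ten_pow_eq]
      exact mul_dvd_mul (pow_dvd_pow 2 (le_trans (le_max_left a b) hmax))
        (pow_dvd_pow 5 (le_trans (le_max_right a b) hmax))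
    have hMdvd : M ∣ 10 ^ (j - i) - 1 := by
      have hmm : (10:ℕ) ^ (j - i) ≡ 1 [MOD M] := (pvOrd_dvd M hM hc _).mpr hdvd
      exact (Nat.modEq_iff_dvd' honele).mp hmm.symm
    have hcopp : Nat.Coprime (2 ^ a * 5 ^ b) M := by
      apply Nat.Coprime.mul_left
      · exact Nat.Coprime.pow_left a ((Nat.Prime.coprime_iff_not_dvd Nat.prime_two).mpr h2)
      · exact Nat.Coprime.pow_left b ((Nat.Prime.coprime_iff_not_dvd (by norm_num)).mpr h5)
    rw [hn]
    exact mul_dvd_mul h25 hMdvd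

theorem n_dvd_pow_iff (a b M n : ℕ) (hn : n = 2 ^ a * 5 ^ b * M)
    (h2 : ¬ 2 ∣ M) (h5 : ¬ 5 ∣ M) (hM : 0 < M) (k : ℕ) :
    n ∣ 10 ^ k ↔ (M = 1 ∧ max a b ≤ k) := by
  constructor
  · intro h
    have hMd : M ∣ 10 ^ k := (show M ∣ n from ⟨2 ^ a * 5 ^ b, by rw [hn]; ring⟩).trans h
    have hM1 : M = 1 :=
      (Nat.Coprime.pow_right k (cop10 M h2 h5).symm).eq_one_of_dvd hMd
    have h2a : a ≤ k := two_pow_dvd a k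
      ((show (2:ℕ) ^ a ∣ n from ⟨5 ^ b * M, by rw [hn]; ring⟩).trans h)
    have h5b : b ≤ k := five_pow_dvd b k
      ((show (5:ℕ) ^ b ∣ n from ⟨2 ^ a * M, by rw [hn]; ring⟩).trans h)
    exact ⟨hM1, max_le h2a h5b⟩
  · rintro ⟨hM1, hmax⟩
    rw [hn, hM1, mul_one, ten_pow_eq]
    exact mul_dvd_mul (pow_dvd_pow 2 (le_trans (le_max_left a b) hmax))
      (pow_dvd_pow 5 (le_trans (le_max_right a b) hmax))

-- ---------- the value sequence of A's inner loop ----------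
def pvV (n : ℕ) : ℕ → ℕ
  | 0 => 1
  | k+1 => 10 * (10 ^ k % n)

theorem pvV_mod (n k : ℕ) : pvV n k % n = 10 ^ k % n := by
  cases k with
  | zero => rfl
  | succ k =>
    show 10 * (10 ^ k % n) % n = 10 ^ (k+1) % n
    rw [Nat.mul_mod, Nat.mod_mod_of_dvd _ dvd_rfl, ← Nat.mul_mod, pow_succ, mul_comm]

theorem pvV_succ (n k : ℕ) : pvV n (k+1) = 10 * (pvV n k % n) := by
  rw [pvV_mod]; rfl

theorem pvV_ne_one (n k : ℕ) (hk : 1 ≤ k) : pvV n k ≠ 1 := by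
  cases k with
  | zero => omega
  | succ k => show 10 * (10 ^ k % n) ≠ 1; omega

theorem pvV_eq_iff (n i k : ℕ) (hi : 1 ≤ i) (hk : 1 ≤ k) :
    pvV n i = pvV n k ↔ (10 ^ (i-1) ≡ 10 ^ (k-1) [MOD n]) := by
  obtain ⟨i', rfl⟩ : ∃ i', i = i' + 1 := ⟨i - 1, by omega⟩
  obtain ⟨k', rfl⟩ : ∃ k', k = k' + 1 := ⟨k - 1, by omega⟩
  show 10 * (10 ^ i' % n) = 10 * (10 ^ k' % n) ↔ 10 ^ (i' + 1 - 1) % n = 10 ^ (k' + 1 - 1) % n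
  simp only [Nat.add_sub_cancel]
  constructor
  · intro h
    exact Nat.eq_of_mul_eq_mul_left (by norm_num : 0 < 10) h
  · intro h
    rw [h]

theorem pvV_eq_zero_iff (n i : ℕ) (hi : 1 ≤ i) : pvV n i = 0 ↔ n ∣ 10 ^ (i-1) := by
  obtain ⟨i', rfl⟩ : ∃ i', i = i' + 1 := ⟨i - 1, by omega⟩
  show 10 * (10 ^ i' % n) = 0 ↔ n ∣ 10 ^ (i' + 1 - 1)
  simp only [Nat.add_sub_cancel]
  rw [Nat.dvd_iff_mod_eq_zero]
  omega

-- ---------- the dictionary built by A's inner loop ----------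
def pvQ (n : ℕ) (k : ℕ) : Std.TreeMap Int Int :=
  (List.range k).foldl (fun q i => q.insert ((pvV n i : ℤ)) ((i:ℤ)+1))
    ((∅ : Std.TreeMap Int Int).insert 0 0)

theorem pvQ_succ (n k : ℕ) :
    pvQ n (k+1) = (pvQ n k).insert ((pvV n k : ℤ)) ((k:ℤ)+1) := by
  unfold pvQ; rw [List.range_succ, List.foldl_append]; rfl

theorem pvQ_contains (n k : ℕ) (x : ℤ) :
    (pvQ n k).contains x = true ↔ (x = 0 ∨ ∃ i, i < k ∧ x = (pvV n i : ℤ)) := by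
  induction k with
  | zero =>
    show ((∅ : Std.TreeMap Int Int).insert 0 0).contains x = true ↔ _
    rw [Std.TreeMap.contains_insert]
    simp only [Bool.or_eq_true, beq_iff_eq, compare_eq_iff_eq, Std.TreeMap.contains_emptyc,
      Bool.false_eq_true, or_false]
    constructor
    · intro h
      exact Or.inl h.symm
    · rintro (rfl | ⟨i, hi, _⟩)
      · rfl
      · omega
  | succ k ih =>
    rw [pvQ_succ, Std.TreeMap.contains_insert]
    simp only [Bool.or_eq_true, beq_iff_eq, compare_eq_iff_eq]
    rw [ih]
    constructor
    · rintro (h | h)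
      · exact Or.inr ⟨k, by omega, h.symm⟩
      · rcases h with h | ⟨i, hi, hx⟩
        exacts [Or.inl h, Or.inr ⟨i, by omega, hx⟩]
    · rintro (h | ⟨i, hi, hx⟩)
      · exact Or.inr (Or.inl h)
      · by_cases hik : i = k
        · subst hik; exact Or.inl hx.symm
        · exact Or.inr (Or.inr ⟨i, by omega, hx⟩)

theorem pvQ_getD (n j k : ℕ) (hjk : j < k)
    (huniq : ∀ i, i < k → pvV n i = pvV n j → i = j) :
    (pvQ n k).getD ((pvV n j : ℤ)) 0 = (j:ℤ)+1 := by
  induction k with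
  | zero => omega
  | succ k ih =>
    rw [pvQ_succ]
    simp only [Std.TreeMap.getD_insert, compare_eq_iff_eq]
    by_cases hj : j = k
    · subst hj; rw [if_pos rfl]
    · have hne : ((pvV n k : ℤ)) ≠ ((pvV n j : ℤ)) := by
        intro h
        have hk : pvV n k = pvV n j := by exact_mod_cast h
        exact hj (huniq k (by omega) hk).symm
      rw [if_neg hne]
      exact ih (by omega) (fun i hi h => huniq i (by omega) h)

-- ---------- running A's while loop ----------
theorem aWhile_run (n : ℕ) : ∀ (k fuel : ℕ),
    (∀ j, j < k → ((pvQ n j).contains ((pvV n j : ℤ)) = false)) →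
    aWhile (n : ℤ) (k + fuel) ((∅ : Std.TreeMap Int Int).insert 0 0) 1 0
      = aWhile (n : ℤ) fuel (pvQ n k) ((pvV n k : ℤ)) (k : ℤ) := by
  intro k
  induction k with
  | zero => intro fuel _; norm_num [pvQ, pvV]
  | succ k ih =>
    intro fuel hfresh
    have e1 : (k+1) + fuel = k + (fuel + 1) := by omega
    rw [e1, ih (fuel+1) (fun j hj => hfresh j (by omega))]
    show (if (pvQ n k).contains ((pvV n k : ℤ)) = true then _ else _) = _
    rw [if_neg (by rw [hfresh k (by omega)]; exact Bool.false_ne_true)]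
    have ecur : PySem.Int.mod ((pvV n k : ℕ) : ℤ) (n : ℤ) * 10 = ((pvV n (k+1) : ℕ) : ℤ) := by
      rw [PySem.Int.mod_natCast, pvV_succ]
      push_cast
      ring
    rw [ecur, ← pvQ_succ]
    congr 1

theorem aWhile_exit (n : ℕ) (k fuel : ℕ)
    (hc : (pvQ n k).contains ((pvV n k : ℤ)) = true) :
    aWhile (n : ℤ) (fuel+1) (pvQ n k) ((pvV n k : ℤ)) (k : ℤ)
      = (pvQ n k, ((pvV n k : ℤ)), (k : ℤ)) := by
  show (if (pvQ n k).contains ((pvV n k : ℤ)) = true then _ else _) = _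
  rw [if_pos hc]

-- ---------- per-denominator characterisation of A's body ----------
theorem size_bounds (a b M n : ℕ) (hn : n = 2 ^ a * 5 ^ b * M) (hM : 0 < M) :
    a ≤ n ∧ b ≤ n ∧ M ≤ n := by
  have hn1 : 0 < n := by
    rw [hn]
    exact Nat.mul_pos (Nat.mul_pos (Nat.pow_pos (by norm_num)) (Nat.pow_pos (by norm_num))) hM
  have h2 : (2:ℕ) ^ a ≤ n := Nat.le_of_dvd hn1 ⟨5 ^ b * M, by rw [hn]; ring⟩
  have h5 : (5:ℕ) ^ b ≤ n := Nat.le_of_dvd hn1 ⟨2 ^ a * M, by rw [hn]; ring⟩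
  have hMn : M ≤ n := Nat.le_of_dvd hn1 ⟨2 ^ a * 5 ^ b, by rw [hn]; ring⟩
  have ha := Nat.lt_two_pow_self (n := a)
  have hb := Nat.lt_two_pow_self (n := b)
  have hb5 : (2:ℕ) ^ b ≤ 5 ^ b := Nat.pow_le_pow_left (by norm_num) b
  omega

theorem fresh_all (a b M n : ℕ) (hn : n = 2 ^ a * 5 ^ b * M)
    (h2 : ¬ 2 ∣ M) (h5 : ¬ 5 ∣ M) (hM : 0 < M)
    (j : ℕ) (hj1 : M = 1 → j ≤ max a b) (hj2 : j ≤ max a b + pvOrd M) :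
    (pvQ n j).contains ((pvV n j : ℤ)) = false := by
  rw [← Bool.not_eq_true, pvQ_contains]
  push_neg
  constructor
  · intro hz
    have h0 : pvV n j = 0 := by exact_mod_cast hz
    rcases Nat.eq_zero_or_pos j with rfl | hjpos
    · simp [pvV] at h0
    · have hd := (pvV_eq_zero_iff n j hjpos).mp h0
      have hiff := (n_dvd_pow_iff a b M n hn h2 h5 hM (j-1)).mp hd
      have hj1' := hj1 hiff.1
      omega
  · intro i hi hx
    have hxx : pvV n j = pvV n i := by exact_mod_cast hx
    rcases Nat.eq_zero_or_pos i with rfl | hipos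
    · have h1 : pvV n j = 1 := by simpa [pvV] using hxx
      exact pvV_ne_one n j (by omega) h1
    · have hcong := (pvV_eq_iff n i j hipos (by omega)).mp hxx.symm
      have hres := (cong_lt a b M n hn h2 h5 hM (i-1) (j-1) (by omega)).mp hcong
      have htpos : 0 < pvOrd M := pvOrd_pos M hM (cop10 M h2 h5)
      have hpos2 : 0 < j - 1 - (i - 1) := by omega
      have hled := Nat.le_of_dvd hpos2 hres.2
      have := hres.1
      omega

theorem aBody_char (a b M n : ℕ) (hn : n = 2 ^ a * 5 ^ b * M)
    (h2 : ¬ 2 ∣ M) (h5 : ¬ 5 ∣ M) (hM : 0 < M) (st : ℤ × ℤ) :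
    aBody st (n : ℤ) = if M = 1 then st
      else (if (pvOrd M : ℤ) - 1 > st.1 then ((pvOrd M : ℤ) - 1, (n : ℤ)) else st) := by
  have hc := cop10 M h2 h5
  obtain ⟨han, hbn, hMn⟩ := size_bounds a b M n hn hM
  have hfuel : (2 * (n:ℤ) + 4).toNat = 2 * n + 4 := by omega
  have htpos : 0 < pvOrd M := pvOrd_pos M hM hc
  by_cases hM1 : M = 1
  · -- terminating decimal: the loop reaches 0 at step (max a b) + 1 and A skips d
    rw [if_pos hM1]
    subst hM1
    have hone : pvOrd 1 = 1 := pvOrd_one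
    set K := max a b + 1 with hK
    have hzero : pvV n K = 0 := by
      rw [pvV_eq_zero_iff n K (by omega)]
      exact (n_dvd_pow_iff a b 1 n hn h2 h5 hM (K-1)).mpr ⟨rfl, by omega⟩
    have hcont : (pvQ n K).contains ((pvV n K : ℤ)) = true := by
      rw [pvQ_contains]
      left
      exact_mod_cast hzero
    have hfr : ∀ j, j < K → ((pvQ n j).contains ((pvV n j : ℤ)) = false) := by
      intro j hj
      exact fresh_all a b 1 n hn h2 h5 hM j (fun _ => by omega) (by omega)
    have hsplit : 2 * n + 4 = K + (2 * n + 4 - K) := by omega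
    obtain ⟨f, hf⟩ : ∃ f, 2 * n + 4 - K = f + 1 := ⟨2 * n + 4 - K - 1, by omega⟩
    have hres : aWhile ((n:ℤ)) ((2 * (n:ℤ) + 4).toNat) ((∅ : Std.TreeMap Int Int).insert 0 0) 1 0
        = (pvQ n K, ((pvV n K : ℕ) : ℤ), (K:ℤ)) := by
      rw [hfuel, hsplit, aWhile_run n K _ hfr, hf, aWhile_exit n K f hcont]
    simp only [aBody, hres]
    rw [if_pos (by exact_mod_cast hzero)]
  · -- repeating decimal: the loop closes the cycle at step (max a b) + t + 1
    rw [if_neg hM1]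
    have hM2 : 2 ≤ M := by omega
    have htlt : pvOrd M < M := pvOrd_lt M hM2 hc
    set K := max a b + pvOrd M + 1 with hK
    have hcoll : pvV n K = pvV n (max a b + 1) := by
      rw [pvV_eq_iff n K (max a b + 1) (by omega) (by omega)]
      refine Nat.ModEq.symm ?_
      rw [show K - 1 = max a b + pvOrd M by omega, show max a b + 1 - 1 = max a b from rfl]
      exact (cong_lt a b M n hn h2 h5 hM (max a b) (max a b + pvOrd M) (by omega)).mpr
        ⟨le_refl _, by simp⟩
    have hnz : pvV n K ≠ 0 := by
      intro hz
      have hd := (pvV_eq_zero_iff n K (by omega)).mp hz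
      exact hM1 ((n_dvd_pow_iff a b M n hn h2 h5 hM (K-1)).mp hd).1
    have hcont : (pvQ n K).contains ((pvV n K : ℤ)) = true := by
      rw [pvQ_contains]
      refine Or.inr ⟨max a b + 1, by omega, ?_⟩
      exact_mod_cast congrArg (fun z : ℕ => (z:ℤ)) hcoll
    have hfr : ∀ j, j < K → ((pvQ n j).contains ((pvV n j : ℤ)) = false) := by
      intro j hj
      exact fresh_all a b M n hn h2 h5 hM j (fun h => absurd h hM1) (by omega)
    have huniq : ∀ i, i < K → pvV n i = pvV n (max a b + 1) → i = max a b + 1 := by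
      intro i hi hv
      rcases Nat.eq_zero_or_pos i with rfl | hipos
      · exfalso
        have h1 : pvV n (max a b + 1) = 1 := by
          have hvv := hv.symm
          simpa [pvV] using hvv
        exact pvV_ne_one n (max a b + 1) (by omega) h1
      · rcases Nat.lt_trichotomy i (max a b + 1) with hlt | heq | hgt
        · exfalso
          have hcong := (pvV_eq_iff n i (max a b + 1) hipos (by omega)).mp hv
          have hres := (cong_lt a b M n hn h2 h5 hM (i-1) (max a b) (by omega)).mp hcong
          omega
        · exact heq
        · exfalso
          have hcong := (pvV_eq_iff n (max a b + 1) i (by omega) hipos).mp hv.symm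
          have hres := (cong_lt a b M n hn h2 h5 hM (max a b) (i-1) (by omega)).mp hcong
          have hpos2 : 0 < i - 1 - max a b := by omega
          have := Nat.le_of_dvd hpos2 hres.2
          omega
    have hsplit : 2 * n + 4 = K + (2 * n + 4 - K) := by omega
    obtain ⟨f, hf⟩ : ∃ f, 2 * n + 4 - K = f + 1 := ⟨2 * n + 4 - K - 1, by omega⟩
    have hres : aWhile ((n:ℤ)) ((2 * (n:ℤ) + 4).toNat) ((∅ : Std.TreeMap Int Int).insert 0 0) 1 0
        = (pvQ n K, ((pvV n K : ℕ) : ℤ), (K:ℤ)) := by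
      rw [hfuel, hsplit, aWhile_run n K _ hfr, hf, aWhile_exit n K f hcont]
    have hgetD : (pvQ n K).getD ((pvV n K : ℤ)) 0 = ((max a b + 1 : ℕ) : ℤ) + 1 := by
      have hcast : ((pvV n K : ℕ) : ℤ) = ((pvV n (max a b + 1) : ℕ) : ℤ) := by
        exact_mod_cast hcoll
      rw [hcast]
      exact pvQ_getD n (max a b + 1) K (by omega) huniq
    have hlen : (K:ℤ) - (((max a b + 1 : ℕ) : ℤ) + 1) = (pvOrd M : ℤ) - 1 := by
      rw [hK]
      push_cast
      ring
    simp only [aBody, hres]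
    rw [if_neg (by exact_mod_cast hnz), hgetD, hlen]

-- ---------- running B's order loop ----------
theorem bOrder_run (M : ℕ) (hM : 2 ≤ M) (hc : Nat.Coprime 10 M) : ∀ (s fuel : ℕ),
    s < pvOrd M →
    bOrder (M:ℤ) (s + fuel) (((10 ^ 1 % M : ℕ) : ℤ)) 1
      = bOrder (M:ℤ) fuel (((10 ^ (s+1) % M : ℕ) : ℤ)) ((s:ℤ)+1) := by
  intro s
  induction s with
  | zero => intro fuel _; norm_num
  | succ s ih =>
    intro fuel hs
    have e1 : (s+1) + fuel = s + (fuel + 1) := by omega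
    rw [e1, ih (fuel+1) (by omega)]
    show (if ((10 ^ (s+1) % M : ℕ) : ℤ) = 1 then _ else _) = _
    rw [if_neg ?hne]
    case hne =>
      intro h
      have hh : (10:ℕ) ^ (s+1) % M = 1 % M := by
        rw [Nat.one_mod_eq_one.mpr (by omega)]
        exact_mod_cast h
      exact pvOrd_min M (by omega) hc (s+1) (by omega) (by omega) hh
    have er : PySem.Int.mod ((((10:ℕ) ^ (s+1) % M : ℕ) : ℤ) * 10) (M:ℤ)
        = (((10:ℕ) ^ (s+1+1) % M : ℕ) : ℤ) := by
      have e2 : ((((10:ℕ) ^ (s+1) % M : ℕ)) : ℤ) * 10 = (((10 ^ (s+1) % M) * 10 : ℕ) : ℤ) := by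
        push_cast
        ring
      rw [e2, PySem.Int.mod_natCast]
      congr 1
      rw [Nat.mod_mul_mod, ← pow_succ]
    rw [er]
    congr 1

theorem bOrder_eval (M : ℕ) (hM : 2 ≤ M) (hc : Nat.Coprime 10 M) :
    bOrder (M:ℤ) M (((10 ^ 1 % M : ℕ) : ℤ)) 1 = (pvOrd M : ℤ) := by
  have htpos : 0 < pvOrd M := pvOrd_pos M (by omega) hc
  have htlt : pvOrd M < M := pvOrd_lt M hM hc
  have hsplit : M = (pvOrd M - 1) + (M - pvOrd M + 1) := by omega
  obtain ⟨f, hf⟩ : ∃ f, M - pvOrd M + 1 = f + 1 := ⟨M - pvOrd M, rfl⟩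
  have hrun := bOrder_run M hM hc (pvOrd M - 1) (M - pvOrd M + 1) (by omega)
  nth_rewrite 2 [hsplit]
  rw [hrun, hf]
  have hone : (10:ℕ) ^ (pvOrd M - 1 + 1) % M = 1 := by
    have e : pvOrd M - 1 + 1 = pvOrd M := by omega
    rw [e]
    have hp := pvOrd_pow M (by omega) hc
    have h1M : 1 % M = 1 := Nat.one_mod_eq_one.mpr (by omega)
    rw [← h1M]
    exact hp
  show (if ((10 ^ (pvOrd M - 1 + 1) % M : ℕ) : ℤ) = 1 then ((pvOrd M - 1 : ℕ) : ℤ) + 1 else _)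
    = (pvOrd M : ℤ)
  rw [if_pos (by rw [hone]; norm_num)]
  rw [Nat.cast_sub (by omega : 1 ≤ pvOrd M)]
  push_cast
  ring

-- ---------- B's strip loops ----------
theorem bStripF_spec (p : ℤ) (hp : 2 ≤ p) : ∀ (fuel : ℕ) (m : ℤ), 1 ≤ m → m ≤ (fuel : ℤ) →
    ∃ a : ℕ, m = p ^ a * bStripF p fuel m ∧ 1 ≤ bStripF p fuel m ∧ ¬ (p ∣ bStripF p fuel m) := by
  intro fuel
  induction fuel with
  | zero =>
    intro m h1 h2
    exfalso
    simp at h2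
    omega
  | succ fuel ih =>
    intro m h1 hle
    by_cases hdvd : PySem.Int.mod m p = 0
    · have hpd : p ∣ m := (PySem.Int.mod_eq_zero_iff_dvd m p).mp hdvd
      have hfd : PySem.Int.floordiv m p = m / p := PySem.Int.floordiv_eq_ediv_of_pos (by omega)
      obtain ⟨c, hcm⟩ := hpd
      have hc1 : 1 ≤ c := by nlinarith
      have hdivc : m / p = c := by rw [hcm]; exact Int.mul_ediv_cancel_left c (by omega)
      have h2c : 2 * c ≤ m := by nlinarith
      have hfc : ((fuel + 1 : ℕ) : ℤ) = (fuel : ℤ) + 1 := by push_cast; ring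
      have hcle : c ≤ (fuel : ℤ) := by omega
      obtain ⟨A, hA, hA1, hAnd⟩ := ih c hc1 hcle
      have hstep : bStripF p (fuel+1) m = bStripF p fuel c := by
        simp only [bStripF]
        rw [if_pos hdvd, hfd, hdivc]
      refine ⟨A+1, ?_, ?_, ?_⟩
      · rw [hstep]
        calc m = p * c := hcm
        _ = p * (p ^ A * bStripF p fuel c) := by rw [← hA]
        _ = p ^ (A+1) * bStripF p fuel c := by ring
      · rw [hstep]; exact hA1
      · rw [hstep]; exact hAnd
    · have hstep : bStripF p (fuel+1) m = m := by
        simp only [bStripF]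
        rw [if_neg hdvd]
      refine ⟨0, by rw [hstep]; ring, by rw [hstep]; exact h1, ?_⟩
      rw [hstep]
      intro hd
      exact hdvd ((PySem.Int.mod_eq_zero_iff_dvd m p).mpr hd)

theorem bStrip_spec (p m : ℤ) (hp : 2 ≤ p) (hm : 1 ≤ m) :
    ∃ a : ℕ, m = p ^ a * bStrip p m ∧ 1 ≤ bStrip p m ∧ ¬ (p ∣ bStrip p m) := by
  unfold bStrip
  exact bStripF_spec p hp m.toNat m hm (by omega)

-- ---------- per-denominator characterisation of B's body ----------
theorem bBody_char (M : ℕ) (d : ℤ) (hstrip : bStrip 5 (bStrip 2 d) = (M:ℤ))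
    (hM : 0 < M) (hc : Nat.Coprime 10 M) (st : ℤ × ℤ) :
    bBody st d = if M = 1 then st
      else (if (pvOrd M : ℤ) > st.1 then ((pvOrd M : ℤ), d) else st) := by
  by_cases hM1 : M = 1
  · rw [if_pos hM1]
    subst hM1
    simp [bBody, hstrip]
  · rw [if_neg hM1]
    have hM2 : 2 ≤ M := by omega
    have h10 : PySem.Int.mod 10 (M:ℤ) = (((10:ℕ) ^ 1 % M : ℕ) : ℤ) := by
      have hmn := PySem.Int.mod_natCast 10 M
      rw [pow_one]
      exact_mod_cast hmn
    have hMne : ((M:ℕ) : ℤ) ≠ 1 := by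
      intro h
      exact hM1 (by exact_mod_cast h)
    simp only [bBody, hstrip]
    rw [if_neg hMne, h10, Int.toNat_natCast, bOrder_eval M hM2 hc]

-- ---------- one step of both outer loops, related ----------
theorem step_pair (d : ℤ) (hd : 1 ≤ d) (c D : ℤ) (hc2 : 2 ≤ c) :
    ∃ c' D', 2 ≤ c' ∧ aBody (c - 1, D) d = (c' - 1, D')
      ∧ bBody (c, D) d = (c', D') := by
  obtain ⟨a, ha, h1, h2d⟩ := bStrip_spec 2 d (by norm_num) hd
  obtain ⟨b, hb, h1', h5d⟩ := bStrip_spec 5 (bStrip 2 d) (by norm_num) h1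
  set m := bStrip 5 (bStrip 2 d) with hmdef
  set M := m.toNat with hMdef
  have hmM : m = (M:ℤ) := by omega
  have hM1 : 0 < M := by omega
  set n := d.toNat with hndef
  have hdn : d = (n:ℤ) := by omega
  have h2M : ¬ (2:ℕ) ∣ M := by
    intro hh
    have h2m : (2:ℤ) ∣ m := by rw [hmM]; exact_mod_cast hh
    exact h2d (by rw [hb]; exact Dvd.dvd.mul_left h2m _)
  have h5M : ¬ (5:ℕ) ∣ M := by
    intro hh
    have h5m : (5:ℤ) ∣ m := by rw [hmM]; exact_mod_cast hh
    exact h5d h5m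
  have hfact : n = 2 ^ a * 5 ^ b * M := by
    have hzz : d = 2 ^ a * 5 ^ b * m := by rw [ha, hb]; ring
    rw [hdn, hmM] at hzz
    exact_mod_cast hzz
  have hcop := cop10 M h2M h5M
  have hstrip : bStrip 5 (bStrip 2 d) = (M:ℤ) := hmM
  by_cases hM1' : M = 1
  · refine ⟨c, D, hc2, ?_, ?_⟩
    · rw [hdn, aBody_char a b M n hfact h2M h5M hM1 (c-1, D), if_pos hM1']
    · rw [bBody_char M d hstrip hM1 hcop (c, D), if_pos hM1']
  · by_cases hgt : (pvOrd M : ℤ) > c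
    · refine ⟨(pvOrd M : ℤ), d, by omega, ?_, ?_⟩
      · rw [hdn, aBody_char a b M n hfact h2M h5M hM1 (c-1, D), if_neg hM1',
          if_pos (by omega)]
      · rw [bBody_char M d hstrip hM1 hcop (c, D), if_neg hM1', if_pos (by omega)]
    · refine ⟨c, D, hc2, ?_, ?_⟩
      · rw [hdn, aBody_char a b M n hfact h2M h5M hM1 (c-1, D), if_neg hM1',
          if_neg (by omega)]
      · rw [bBody_char M d hstrip hM1 hcop (c, D), if_neg hM1', if_neg (by omega)]

-- ---------- the two outer folds stay in lock-step ----------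
theorem fold_rel (ds : List ℤ) : ∀ (c D : ℤ), 2 ≤ c → (∀ x ∈ ds, 1 ≤ x) →
    ∃ c' D', 2 ≤ c' ∧ ds.foldl aBody (c - 1, D) = (c' - 1, D')
      ∧ ds.foldl bBody (c, D) = (c', D') := by
  induction ds with
  | nil => intro c D hc _; exact ⟨c, D, hc, rfl, rfl⟩
  | cons d ds ih =>
    intro c D hc hmem
    obtain ⟨c1, D1, hc1, hA, hB⟩ := step_pair d (hmem d (by simp)) c D hc
    obtain ⟨c', D', hc', hA', hB'⟩ := ih c1 D1 hc1 (fun x hx => hmem x (by simp [hx]))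
    refine ⟨c', D', hc', ?_, ?_⟩
    · rw [List.foldl_cons, hA, hA']
    · rw [List.foldl_cons, hB, hB']

theorem main_unchanged : ∀ (limit : Int), ¬ D_calc_longest_recur_cycle limit →
    calc_longest_recur_cycle limit = calc_longest_recur_cycle_alt limit := by
  intro limit hD
  unfold D_calc_longest_recur_cycle at hD
  have hcase : limit ≤ 1 ∨ limit = 2 ∨ limit = 3 ∨ 8 ≤ limit := by omega
  rcases hcase with h | h | h | h
  · unfold calc_longest_recur_cycle calc_longest_recur_cycle_alt
    rw [PySem.List.pyRange_one_eq_nil (by omega)]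
    rfl
  · subst h; decide
  · subst h; decide
  · unfold calc_longest_recur_cycle calc_longest_recur_cycle_alt
    rw [PySem.List.pyRange_one_append 1 8 limit (by norm_num) (by omega),
      List.foldl_append, List.foldl_append]
    have base_a : (PySem.List.pyRange 1 8 1).foldl aBody ((0:ℤ), (1:ℤ)) = (5, 7) := by decide
    have base_b : (PySem.List.pyRange 1 8 1).foldl bBody ((0:ℤ), (1:ℤ)) = (6, 7) := by decide
    rw [base_a, base_b]
    obtain ⟨c', D', _, hA, hB⟩ := fold_rel (PySem.List.pyRange 8 limit 1) 6 7 (by norm_num)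
      (fun x hx => by
        have := (PySem.List.mem_pyRange_one).mp hx
        omega)
    rw [show ((5:ℤ), (7:ℤ)) = ((6:ℤ) - 1, (7:ℤ)) by norm_num, hA, hB]

-- ===== VERDICT (by name: the statement is the Claim_ definition above) =====
theorem calc_longest_recur_cycle_spec : Claim_unchanged_calc_longest_recur_cycle := by
  intro limit _ hD
  exact main_unchanged limit hD

theorem calc_longest_recur_cycle_changed : Claim_changed_calc_longest_recur_cycle := by
  unfold Claim_changed_calc_longest_recur_cycle; decide

theorem calc_longest_recur_cycle_tight : Claim_exact_calc_longest_recur_cycle := by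
  unfold Claim_exact_calc_longest_recur_cycle
  intro limit _ hD
  unfold D_calc_longest_recur_cycle at hD
  have : limit = 4 ∨ limit = 5 ∨ limit = 6 ∨ limit = 7 := by omega
  rcases this with h | h | h | h <;> subst h <;> decide
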